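-- pv_equiv track=rewrite | github.com/Vladimir-Moskov/PythonInterview | HackerRank/Hack_Interview_III_US.py | configureProjectPresentation
-- ===== SOURCE A (Python) =====
-- from collections import deque, defaultdict
-- from collections import defaultdict
--
-- def configureProjectPresentation(n, friendships):
--     g = defaultdict(list)
--
--     for a, b in friendships:
--         g[a].append(b)
--         g[b].append(a)
--
--     invited = []
--     uninvited = [2]
--     invited.extend(g[1])
--     invited = set(invited)
--
--     for i in g[2]:
--         if i == 1:
--             continue
--         uninvited.append(i)
--         uninvited.extend(g[i])
--     uninvited = set(uninvited)
--     result = set()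
--     for i in invited:
--         if i not in uninvited and i != 1:
--             result.add(i)
--
--     if result:
--         result = sorted(result)
--     else:
--         result = [-1]
--
--     return result
-- ===== SOURCE B (Python) =====
-- def configureProjectPresentation(n, friendships):
--     g = {}
--     for a, b in friendships:
--         g.setdefault(a, []).append(b)
--         g.setdefault(b, []).append(a)
--     n2 = {x for x in g.get(2, []) if x != 1}
--     kept = set()
--     for c in g.get(1, []):
--         if c != 1 and c != 2 and c not in n2 and n2.isdisjoint(g.get(c, [])):
--             kept.add(c)
--     return sorted(kept) if kept else [-1]
-- ===== Notes on version B (the rewrite author's own statement) =====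
-- stated objective: alternative
-- what changed: Instead of materialising node 2's whole two-hop forbidden set and filtering 1's friends against it, B tests each friend c of node 1 directly (c != 2, c not a friend of 2, and c shares no friend with 2 other than 1 via a disjointness check), relying on the symmetry of the adjacency map.
import Mathlib
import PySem

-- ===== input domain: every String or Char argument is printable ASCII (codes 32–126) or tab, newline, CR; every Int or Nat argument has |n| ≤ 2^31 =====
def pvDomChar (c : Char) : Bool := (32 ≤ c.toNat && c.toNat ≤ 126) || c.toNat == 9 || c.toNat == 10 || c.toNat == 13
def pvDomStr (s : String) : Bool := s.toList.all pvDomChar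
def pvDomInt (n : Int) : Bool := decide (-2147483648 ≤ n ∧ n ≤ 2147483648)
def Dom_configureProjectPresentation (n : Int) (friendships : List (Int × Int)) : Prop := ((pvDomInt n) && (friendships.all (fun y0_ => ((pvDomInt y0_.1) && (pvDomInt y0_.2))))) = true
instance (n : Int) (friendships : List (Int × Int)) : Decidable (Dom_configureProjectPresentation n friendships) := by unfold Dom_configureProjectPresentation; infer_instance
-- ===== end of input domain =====

-- B replaces A's expansion of node 2's two-hop forbidden set by a direct per-candidate
-- test of each friend of node 1 (a disjointness check against 2's friends); same result, proved equal.

-- shared adjacency-building loop: both Pythons run the identical 'for a, b in friendships'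
-- loop appending b to g[a] and a to g[b] (defaultdict-append in A, setdefault-append in B;
-- both are exactly Dict.modify with default [])
def pvAdjStep (g : PySem.Dict Int (List Int)) (p : Int × Int) : PySem.Dict Int (List Int) :=
  (g.modify p.1 [] (· ++ [p.2])).modify p.2 [] (· ++ [p.1])

def pvAdj (friendships : List (Int × Int)) : PySem.Dict Int (List Int) :=
  friendships.foldl pvAdjStep PySem.Dict.empty

-- ===== PORT A =====
-- invited = set([] + g[1])
def pvInvited (g : PySem.Dict Int (List Int)) : PySem.Set Int :=
  PySem.Set.ofList (List.nil ++ g.getD 1 [])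

-- uninvited = [2]; for i in g[2]: if i == 1: continue; uninvited.append(i); uninvited.extend(g[i]); set(...)
def pvUninvited (g : PySem.Dict Int (List Int)) : PySem.Set Int :=
  PySem.Set.ofList
    ((g.getD 2 []).foldl (fun acc i => if i == 1 then acc else (acc ++ [i]) ++ g.getD i []) [2])

-- result = set(); for i in invited: if i not in uninvited and i != 1: result.add(i)
def pvResult (g : PySem.Dict Int (List Int)) : PySem.Set Int :=
  (pvInvited g).foldl
    (fun r i => if !(PySem.Set.contains (pvUninvited g) i) && i != 1 then PySem.Set.add r i else r)
    PySem.Set.empty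

def configureProjectPresentation (n : Int) (friendships : List (Int × Int)) : List Int :=
  if pvResult (pvAdj friendships) ≠ [] then
    PySem.List.sorted (pvResult (pvAdj friendships)) (fun x => x) false
  else [-1]

-- ===== PORT B =====
-- n2 = {x for x in g.get(2, []) if x != 1}
def pvN2 (g : PySem.Dict Int (List Int)) : PySem.Set Int :=
  PySem.Set.ofList ((g.getD 2 []).filter (fun x => x != 1))

-- kept = set(); for c in g.get(1, []): if c != 1 and c != 2 and c not in n2 and n2.isdisjoint(g.get(c, [])): kept.add(c)
def pvKept (g : PySem.Dict Int (List Int)) : PySem.Set Int :=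
  (g.getD 1 []).foldl
    (fun k c =>
      if c != 1 && c != 2 && !(PySem.Set.contains (pvN2 g) c)
          && PySem.Set.isdisjoint (pvN2 g) (g.getD c []) then
        PySem.Set.add k c
      else k)
    PySem.Set.empty

def configureProjectPresentation_alt (n : Int) (friendships : List (Int × Int)) : List Int :=
  if pvKept (pvAdj friendships) ≠ [] then
    PySem.List.sorted (pvKept (pvAdj friendships)) (fun x => x) false
  else [-1]

-- ===== PRECONDITION & SPEC =====
def Spec_configureProjectPresentation (n : Int) (friendships : List (Int × Int)) (out : List Int) : Prop := out = configureProjectPresentation_alt n friendships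
instance (n : Int) (friendships : List (Int × Int)) (out : List Int) : Decidable (Spec_configureProjectPresentation n friendships out) := by unfold Spec_configureProjectPresentation; infer_instance

-- ===== CLAIM (what is proved, stated in full; the proofs are below) =====
def Claim_equal_configureProjectPresentation : Prop := ∀ (n : Int) (friendships : List (Int × Int)), Dom_configureProjectPresentation n friendships → Spec_configureProjectPresentation n friendships (configureProjectPresentation n friendships)

-- ===== LEMMAS AND PROOFS =====

theorem pvContains_false (s : PySem.Set Int) (x : Int) : (PySem.Set.contains s x = false) ↔ x ∉ s := by
  rw [← Bool.not_eq_true, PySem.Set.contains_iff]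

-- membership after one edge-insertion step
theorem pvAdjStep_mem (g : PySem.Dict Int (List Int)) (p : Int × Int) (x y : Int) :
    y ∈ (pvAdjStep g p).getD x [] ↔
      y ∈ g.getD x [] ∨ (x = p.1 ∧ y = p.2) ∨ (x = p.2 ∧ y = p.1) := by
  unfold pvAdjStep
  simp only [PySem.Dict.getD_modify]
  by_cases hb : x = p.2 <;> by_cases ha : x = p.1 <;> by_cases hq : p.1 = p.2 <;>
    simp_all [List.mem_append]

-- the adjacency map is symmetric
theorem pvAdj_symm_aux (fs : List (Int × Int)) (g : PySem.Dict Int (List Int))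
    (hg : ∀ x y, y ∈ g.getD x [] ↔ x ∈ g.getD y []) (x y : Int) :
    y ∈ (fs.foldl pvAdjStep g).getD x [] ↔ x ∈ (fs.foldl pvAdjStep g).getD y [] := by
  induction fs generalizing g with
  | nil => exact hg x y
  | cons p t ih =>
      simp only [List.foldl_cons]
      refine ih _ (fun u v => ?_)
      rw [pvAdjStep_mem, pvAdjStep_mem, hg]
      tauto

theorem pvAdj_symm (fs : List (Int × Int)) (x y : Int) :
    y ∈ (pvAdj fs).getD x [] ↔ x ∈ (pvAdj fs).getD y [] := by
  apply pvAdj_symm_aux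
  intro u v
  simp [PySem.Dict.getD_empty]

-- membership in a conditional set-building fold
theorem mem_foldl_add_if (p : Int → Bool) (l : List Int) (s : PySem.Set Int) (x : Int) :
    x ∈ l.foldl (fun r i => if p i then PySem.Set.add r i else r) s ↔
      x ∈ s ∨ (x ∈ l ∧ p x = true) := by
  induction l generalizing s with
  | nil => simp
  | cons h t ih =>
      simp only [List.foldl_cons, List.mem_cons]
      by_cases hp : p h = true
      · rw [if_pos hp, ih]
        simp only [PySem.Set.mem_add]
        constructor
        · rintro (⟨hs | rfl⟩ | ⟨ht, hx⟩)
          · exact Or.inl hs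
          · exact Or.inr ⟨Or.inl rfl, hp⟩
          · exact Or.inr ⟨Or.inr ht, hx⟩
        · rintro (hs | ⟨rfl | ht, hx⟩)
          · exact Or.inl (Or.inl hs)
          · exact Or.inl (Or.inr rfl)
          · exact Or.inr ⟨ht, hx⟩
      · rw [if_neg hp, ih]
        constructor
        · rintro (hs | ⟨ht, hx⟩)
          · exact Or.inl hs
          · exact Or.inr ⟨Or.inr ht, hx⟩
        · rintro (hs | ⟨rfl | ht, hx⟩)
          · exact Or.inl hs
          · exact absurd hx hp
          · exact Or.inr ⟨ht, hx⟩

theorem nodup_foldl_add_if (p : Int → Bool) (l : List Int) (s : PySem.Set Int)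
    (hs : s.Nodup) :
    (l.foldl (fun r i => if p i then PySem.Set.add r i else r) s).Nodup := by
  induction l generalizing s with
  | nil => exact hs
  | cons h t ih =>
      simp only [List.foldl_cons]
      by_cases hp : p h = true
      · rw [if_pos hp]; exact ih _ (PySem.Set.nodup_add _ _ hs)
      · rw [if_neg hp]; exact ih _ hs

-- A's uninvited-building loop, characterised
theorem mem_foldl_ext (g : PySem.Dict Int (List Int)) (l : List Int) (acc : List Int) (x : Int) :
    x ∈ l.foldl (fun acc i => if i == 1 then acc else (acc ++ [i]) ++ g.getD i []) acc ↔
      x ∈ acc ∨ ∃ i ∈ l, i ≠ 1 ∧ (x = i ∨ x ∈ g.getD i []) := by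
  induction l generalizing acc with
  | nil => simp
  | cons h t ih =>
      simp only [List.foldl_cons, List.mem_cons]
      by_cases h1 : h = 1
      · rw [if_pos (by simp [h1]), ih]
        constructor
        · rintro (ha | ⟨i, hi, hne, hx⟩)
          · exact Or.inl ha
          · exact Or.inr ⟨i, Or.inr hi, hne, hx⟩
        · rintro (ha | ⟨i, rfl | hi, hne, hx⟩)
          · exact Or.inl ha
          · exact absurd h1 hne
          · exact Or.inr ⟨i, hi, hne, hx⟩
      · rw [if_neg (by simp [h1]), ih]
        simp only [List.mem_append, List.mem_singleton]
        constructor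
        · rintro (((ha | rfl) | hx) | ⟨i, hi, hne, hx2⟩)
          · exact Or.inl ha
          · exact Or.inr ⟨x, Or.inl rfl, h1, Or.inl rfl⟩
          · exact Or.inr ⟨h, Or.inl rfl, h1, Or.inr hx⟩
          · exact Or.inr ⟨i, Or.inr hi, hne, hx2⟩
        · rintro (ha | ⟨i, rfl | hi, hne, hx⟩)
          · exact Or.inl (Or.inl (Or.inl ha))
          · rcases hx with rfl | hx
            · exact Or.inl (Or.inl (Or.inr rfl))
            · exact Or.inl (Or.inr hx)
          · exact Or.inr ⟨i, hi, hne, hx⟩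

-- the two result sets have the same members (uses symmetry of the adjacency map)
theorem mem_result_iff_kept (fs : List (Int × Int)) (x : Int) :
    x ∈ pvResult (pvAdj fs) ↔ x ∈ pvKept (pvAdj fs) := by
  unfold pvResult pvInvited pvUninvited pvKept pvN2
  rw [mem_foldl_add_if (p := fun i =>
        !(PySem.Set.contains (PySem.Set.ofList ((((pvAdj fs).getD 2 []).foldl
          (fun acc i => if i == 1 then acc else (acc ++ [i]) ++ (pvAdj fs).getD i []) [2]))) i)
        && i != 1),
      mem_foldl_add_if (p := fun c =>
        c != 1 && c != 2
        && !(PySem.Set.contains (PySem.Set.ofList (((pvAdj fs).getD 2 []).filter (fun x => x != 1))) c)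
        && PySem.Set.isdisjoint (PySem.Set.ofList (((pvAdj fs).getD 2 []).filter (fun x => x != 1)))
             ((pvAdj fs).getD c []))]
  simp only [PySem.Set.empty, List.not_mem_nil, false_or, List.nil_append,
    Bool.and_eq_true, Bool.not_eq_true', bne_iff_ne, pvContains_false,
    PySem.Set.mem_ofList, mem_foldl_ext, List.mem_filter, List.mem_cons, or_false,
    PySem.Set.isdisjoint_iff, ne_eq]
  constructor
  · rintro ⟨hm, hnu, hx1⟩
    push Not at hnu
    obtain ⟨h2, hall⟩ := hnu
    refine ⟨hm, ⟨⟨hx1, h2⟩, ?_⟩, ?_⟩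
    · rintro ⟨hx2, _⟩
      exact (hall x hx2 hx1).1 rfl
    · rintro i ⟨hi2, hi1⟩ hig
      exact (hall i hi2 hi1).2 ((pvAdj_symm fs x i).mp hig)
  · rintro ⟨hm, ⟨⟨hx1, h2⟩, hn2⟩, hall⟩
    refine ⟨hm, ?_, hx1⟩
    push Not
    refine ⟨h2, fun i hi2 hi1 => ⟨?_, ?_⟩⟩
    · rintro rfl
      exact hn2 ⟨hi2, hi1⟩
    · intro hxg
      exact hall i ⟨hi2, hi1⟩ ((pvAdj_symm fs i x).mp hxg)

theorem result_perm_kept (fs : List (Int × Int)) :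
    (pvResult (pvAdj fs)).Perm (pvKept (pvAdj fs)) := by
  have h1 : (pvResult (pvAdj fs)).Nodup := nodup_foldl_add_if _ _ _ (by simp [PySem.Set.empty])
  have h2 : (pvKept (pvAdj fs)).Nodup := nodup_foldl_add_if _ _ _ (by simp [PySem.Set.empty])
  exact (List.perm_ext_iff_of_nodup h1 h2).mpr (mem_result_iff_kept fs)

-- ===== VERDICT (by name: the statement is the Claim_ definition above) =====
theorem configureProjectPresentation_spec : Claim_equal_configureProjectPresentation := by
  intro n fs _
  unfold Spec_configureProjectPresentation configureProjectPresentation configureProjectPresentation_alt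
  have hperm := result_perm_kept fs
  by_cases h : pvResult (pvAdj fs) = []
  · have h' : pvKept (pvAdj fs) = [] := by
      have := hperm.length_eq
      rw [h] at this
      exact List.length_eq_zero_iff.mp this.symm
    simp [h, h']
  · have h' : pvKept (pvAdj fs) ≠ [] := by
      intro hk
      have := hperm.length_eq
      rw [hk] at this
      exact h (List.length_eq_zero_iff.mp this)
    rw [if_pos h, if_pos h']
    exact PySem.List.sorted_eq_sorted_of_perm _ _ _ (fun _ _ h => h) hperm
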